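-- pv_equiv track=rewrite | github.com/aguinane/SEP2-Tools | sep2tools/events.py | non_overlapping_periods
-- ===== SOURCE A (Python) =====
-- def non_overlapping_periods(events: list[tuple[int, int]]) -> list[tuple[int, int]]:
--     time_points = []
--     for start, end in events:
--         time_points.append((start, "start"))
--         time_points.append((end, "end"))
--     time_points.sort()
--
--     unique_intervals = []
--     current_interval_start = None
--     active_events = 0
--     for i, (time, typ) in enumerate(time_points):
--         if current_interval_start is not None and time > current_interval_start:
--             unique_intervals.append((current_interval_start, time))
--         if typ == "start":
--             active_events += 1
--         elif typ == "end":
--             active_events -= 1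
--         current_interval_start = time
--
--     split_events = set()
--     for interval_start, interval_end in unique_intervals:
--         for start, end in events:
--             if start < interval_end and end > interval_start:
--                 split_events.add((max(start, interval_start), min(end, interval_end)))
--     return sorted(list(split_events))
-- ===== SOURCE B (Python) =====
-- def non_overlapping_periods(events: list[tuple[int, int]]) -> list[tuple[int, int]]:
--     # Sweep line: one pass over the sorted endpoint set with a running coverage
--     # counter; an elementary interval is emitted iff its coverage is positive.
--     delta = {}
--     for start, end in events:
--         w = 1 if start < end else 0  # an empty/reversed period covers nothing
--         delta[start] = delta.get(start, 0) + w
--         delta[end] = delta.get(end, 0) - w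
--     times = sorted(delta)
--     out = []
--     active = 0
--     for t, nxt in zip(times, times[1:]):
--         active += delta[t]
--         if active > 0:
--             out.append((t, nxt))
--     return out
-- ===== Notes on version B (the rewrite author's own statement) =====
-- stated objective: faster
-- what changed: Replaced A's three passes (build+sort labelled endpoint pairs, rescan the whole event list for every elementary interval to build a set, then sort the set) by a sweep line: a delta dictionary (+1 at start, -1 at end for forward events), one sorted pass over the distinct endpoints with a running coverage counter, emitting each elementary interval whose coverage is positive, already in order.
import Mathlib
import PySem

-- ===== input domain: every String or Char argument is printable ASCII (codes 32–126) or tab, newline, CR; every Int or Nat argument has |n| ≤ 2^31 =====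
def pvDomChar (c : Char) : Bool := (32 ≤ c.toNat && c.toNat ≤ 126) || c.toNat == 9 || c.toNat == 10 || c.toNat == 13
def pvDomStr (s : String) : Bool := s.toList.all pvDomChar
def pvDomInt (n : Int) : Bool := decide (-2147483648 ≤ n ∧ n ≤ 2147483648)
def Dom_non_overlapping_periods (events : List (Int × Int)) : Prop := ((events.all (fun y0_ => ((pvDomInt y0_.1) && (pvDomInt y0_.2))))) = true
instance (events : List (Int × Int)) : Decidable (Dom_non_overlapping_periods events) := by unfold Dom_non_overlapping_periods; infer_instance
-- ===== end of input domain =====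

-- B re-implements A as a single sweep over the sorted endpoint set with a running
-- coverage counter (no rescan of all events per elementary interval); return values agree.

-- ===== PORT A =====
-- state of the 'for i, (time, typ) in enumerate(time_points)' loop:
-- (unique_intervals, current_interval_start, active_events); the enumerate index is unused.
def aScanStep (st : List (Int × Int) × Option Int × Int) (tt : Int × String) : List (Int × Int) × Option Int × Int :=
  let ui := match st.2.1 with
    | some c => if tt.1 > c then st.1 ++ [(c, tt.1)] else st.1
    | none => st.1
  let ae := if tt.2 = "start" then st.2.2 + 1 else if tt.2 = "end" then st.2.2 - 1 else st.2.2
  (ui, some tt.1, ae)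

-- inner loop 'for start, end in events' of the split_events block, for the interval (u, v)
def aClipStep (u v : Int) (s : PySem.Set (Int × Int)) (p : Int × Int) : PySem.Set (Int × Int) :=
  if p.1 < v ∧ p.2 > u then PySem.Set.add s (max p.1 u, min p.2 v) else s

def non_overlapping_periods (events : List (Int × Int)) : List (Int × Int) :=
  let time_points := events.foldl (fun tp p => tp ++ [(p.1, "start"), (p.2, "end")]) []
  let time_points := PySem.List.sorted2 time_points (fun t => t.1) (fun t => t.2)
  let unique_intervals := ((PySem.List.enumerate time_points 0).foldl (fun st it => aScanStep st it.2) ([], none, 0)).1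
  let split_events := unique_intervals.foldl (fun s iv => events.foldl (aClipStep iv.1 iv.2) s) PySem.Set.empty
  PySem.List.sorted2 split_events (fun t => t.1) (fun t => t.2)

-- ===== PORT B =====
-- delta[start] += w ; delta[end] -= w  with w = 1 if start < end else 0
def bDeltaStep (d : PySem.Dict Int Int) (p : Int × Int) : PySem.Dict Int Int :=
  let w : Int := if p.1 < p.2 then 1 else 0
  let d := d.insert p.1 (d.getD p.1 0 + w)
  d.insert p.2 (d.getD p.2 0 - w)

-- body of 'for t, nxt in zip(times, times[1:])': state (active, out)
def bSweepStep (delta : PySem.Dict Int Int) (st : Int × List (Int × Int)) (uv : Int × Int) : Int × List (Int × Int) :=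
  let active := st.1 + delta.getD uv.1 0
  (active, if active > 0 then st.2 ++ [uv] else st.2)

def non_overlapping_periods_alt (events : List (Int × Int)) : List (Int × Int) :=
  let delta := events.foldl bDeltaStep PySem.Dict.empty
  let times := PySem.List.sorted delta.keys (fun x => x)
  let st := (List.zip times (PySem.List.slice times (some 1))).foldl (bSweepStep delta) ((0 : Int), [])
  st.2

-- ===== PRECONDITION & SPEC =====
def Spec_non_overlapping_periods (events : List (Int × Int)) (out : List (Int × Int)) : Prop := out = non_overlapping_periods_alt events
instance (events : List (Int × Int)) (out : List (Int × Int)) : Decidable (Spec_non_overlapping_periods events out) := by unfold Spec_non_overlapping_periods; infer_instance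

-- ===== CLAIM (what is proved, stated in full; the proofs are below) =====
def Claim_equal_non_overlapping_periods : Prop := ∀ (events : List (Int × Int)), Dom_non_overlapping_periods events → Spec_non_overlapping_periods events (non_overlapping_periods events)

-- ===== LEMMAS AND PROOFS =====

-- all endpoints of the events, with multiplicity
def epsOf (events : List (Int × Int)) : List Int := events.flatMap (fun p => [p.1, p.2])
-- the distinct endpoints, strictly increasing
def tsOf (events : List (Int × Int)) : List Int := PySem.List.sorted (PySem.Set.ofList (epsOf events)) (fun x => x)
-- coverage count at time t (as an Int-valued sum of indicators)
def cntOf (events : List (Int × Int)) (t : Int) : Int := (events.map (fun p => if p.1 ≤ t ∧ t < p.2 then (1:Int) else 0)).sum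
-- the per-event contribution to delta[t]
def wOf (p : Int × Int) (t : Int) : Int := (if p.1 = t ∧ p.1 < p.2 then 1 else 0) - (if p.2 = t ∧ p.1 < p.2 then 1 else 0)
def dOf (events : List (Int × Int)) (t : Int) : Int := (events.map (fun p => wOf p t)).sum
-- the common value of both programs
def targetOf (events : List (Int × Int)) : List (Int × Int) :=
  (List.zip (tsOf events) (tsOf events).tail).filter (fun uv => decide (0 < cntOf events uv.1))

-- strictly-increasing dedup of a (sorted) list, given the current value c
def sdedup (c : Int) : List Int → List Int
  | [] => []
  | x :: xs => if c < x then x :: sdedup x xs else sdedup c xs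

theorem mem_epsOf_left {events : List (Int × Int)} {p : Int × Int} (hp : p ∈ events) :
    p.1 ∈ epsOf events := by
  simp only [epsOf, List.mem_flatMap]
  exact ⟨p, hp, by simp⟩

theorem mem_epsOf_right {events : List (Int × Int)} {p : Int × Int} (hp : p ∈ events) :
    p.2 ∈ epsOf events := by
  simp only [epsOf, List.mem_flatMap]
  exact ⟨p, hp, by simp⟩

theorem keys_insert_add (d : PySem.Dict Int Int) (k : Int) (v : Int) :
    (d.insert k v).keys = PySem.Set.add d.keys k := by
  by_cases h : d.contains k = true
  · rw [PySem.Dict.keys_insert_of_contains d v h, PySem.Set.add, if_pos]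
    simpa [PySem.Set.contains] using (PySem.Dict.contains_iff_mem_keys d k).mp h
  · rw [PySem.Dict.keys_insert_of_not_contains d v (by simpa using h), PySem.Set.add, if_neg]
    simp only [PySem.Set.contains, List.contains_eq_mem, decide_eq_true_eq]
    exact fun hm => h ((PySem.Dict.contains_iff_mem_keys d k).mpr hm)

theorem bDelta_keys (events : List (Int × Int)) (d : PySem.Dict Int Int) :
    (events.foldl bDeltaStep d).keys = (epsOf events).foldl PySem.Set.add d.keys := by
  induction events generalizing d with
  | nil => simp [epsOf]
  | cons p es ih =>
    have heps : epsOf (p :: es) = p.1 :: p.2 :: epsOf es := by simp [epsOf]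
    rw [List.foldl_cons, ih, heps, List.foldl_cons, List.foldl_cons]
    congr 1
    show (bDeltaStep d p).keys = _
    unfold bDeltaStep
    rw [keys_insert_add, keys_insert_add]

theorem bDelta_getD (events : List (Int × Int)) (d : PySem.Dict Int Int) (t : Int) :
    (events.foldl bDeltaStep d).getD t 0 = d.getD t 0 + dOf events t := by
  induction events generalizing d with
  | nil => simp [dOf]
  | cons p es ih =>
    have hd : dOf (p :: es) t = wOf p t + dOf es t := by simp [dOf]
    rw [List.foldl_cons, ih, hd]
    have hstep : (bDeltaStep d p).getD t 0 = d.getD t 0 + wOf p t := by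
      obtain ⟨s, e⟩ := p
      unfold bDeltaStep wOf
      simp only [PySem.Dict.getD_insert]
      split_ifs <;> subst_vars <;> omega
    rw [hstep]; ring

theorem cnt_step_sum (events : List (Int × Int)) (q u : Int) (hqu : q < u)
    (h : ∀ x ∈ epsOf events, x ≤ q ∨ u ≤ x) :
    cntOf events u = cntOf events q + dOf events u := by
  unfold cntOf dOf
  rw [← PySem.List.sum_map_add_int]
  apply congrArg List.sum
  apply List.map_congr_left
  intro p hp
  have h1 := h p.1 (mem_epsOf_left hp)
  have h2 := h p.2 (mem_epsOf_right hp)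
  unfold wOf
  split_ifs <;> omega

theorem cnt_zero (events : List (Int × Int)) (q : Int)
    (h : ∀ x ∈ epsOf events, q < x) :
    cntOf events q = 0 := by
  unfold cntOf
  apply List.sum_eq_zero
  intro x hx
  obtain ⟨p, hp, rfl⟩ := List.mem_map.mp hx
  have := h p.1 (mem_epsOf_left hp)
  rw [if_neg (by omega)]

theorem sweep_go (events : List (Int × Int)) (D : PySem.Dict Int Int)
    (hD : ∀ t, D.getD t 0 = dOf events t) :
    ∀ (l : List Int) (q : Int) (a : Int) (out : List (Int × Int)),
    l.Pairwise (· < ·) →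
    (∀ y ∈ l, q < y) →
    (∀ x ∈ epsOf events, x ≤ q ∨ x ∈ l) →
    a = cntOf events q →
    ((List.zip l l.tail).foldl (bSweepStep D) (a, out)).2
      = out ++ (List.zip l l.tail).filter (fun uv => decide (0 < cntOf events uv.1))
  | [], q, a, out, _, _, _, _ => by simp
  | [u], q, a, out, _, _, _, _ => by simp
  | u :: v :: r, q, a, out, hpw, hq, heps, ha => by
    have hlt : ∀ y ∈ v :: r, u < y := fun y hy => (List.pairwise_cons.mp hpw).1 y hy
    have huq : q < u := hq u (by simp)
    have hcnt : cntOf events u = cntOf events q + dOf events u := by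
      apply cnt_step_sum events q u huq
      intro x hx
      rcases heps x hx with hle | hmem
      · exact Or.inl hle
      · rcases List.mem_cons.mp hmem with rfl | hmem
        · exact Or.inr le_rfl
        · exact Or.inr (le_of_lt (hlt x hmem))
    have hact : a + D.getD u 0 = cntOf events u := by rw [hD, ha, hcnt]
    have hrec := sweep_go events D hD (v :: r) u (a + D.getD u 0)
    have htail : ∀ x ∈ epsOf events, x ≤ u ∨ x ∈ v :: r := by
      intro x hx
      rcases heps x hx with hle | hmem
      · exact Or.inl (le_of_lt (lt_of_le_of_lt hle huq))
      · rcases List.mem_cons.mp hmem with rfl | hmem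
        · exact Or.inl le_rfl
        · exact Or.inr hmem
    simp only [List.tail_cons, List.zip_cons_cons] at *
    rw [List.foldl_cons, List.filter_cons]
    by_cases hpos : 0 < cntOf events u
    · have hb : bSweepStep D (a, out) (u, v) = (a + D.getD u 0, out ++ [(u, v)]) := by
        unfold bSweepStep
        simp only []
        rw [if_pos (by omega)]
      rw [hb, if_pos (by simpa using hpos)]
      have := hrec (out ++ [(u, v)]) (List.pairwise_cons.mp hpw).2 hlt htail hact
      simpa [List.tail_cons, List.zip_cons_cons, List.append_assoc] using this
    · have hb : bSweepStep D (a, out) (u, v) = (a + D.getD u 0, out) := by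
        unfold bSweepStep
        simp only []
        rw [if_neg (by omega)]
      rw [hb, if_neg (by simpa using hpos)]
      simpa [List.tail_cons, List.zip_cons_cons] using
        hrec out (List.pairwise_cons.mp hpw).2 hlt htail hact

theorem b_eq_target (events : List (Int × Int)) :
    non_overlapping_periods_alt events = targetOf events := by
  unfold non_overlapping_periods_alt
  simp only []
  have hkeys : (events.foldl bDeltaStep PySem.Dict.empty).keys = PySem.Set.ofList (epsOf events) := by
    rw [bDelta_keys]
    rfl
  have hD : ∀ t, (events.foldl bDeltaStep PySem.Dict.empty).getD t 0 = dOf events t := by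
    intro t
    rw [bDelta_getD]
    simp [PySem.Dict.getD_empty]
  rw [hkeys, PySem.List.slice_from_one]
  show ((List.zip (tsOf events) (tsOf events).tail).foldl (bSweepStep _) (0, [])).2 = _
  have hpw : (tsOf events).Pairwise (· < ·) := PySem.List.sorted_ofList_pairwise_lt (epsOf events)
  have hmem : ∀ x ∈ epsOf events, x ∈ tsOf events := by
    intro x hx
    rw [tsOf, PySem.List.mem_sorted, PySem.Set.mem_ofList]
    exact hx
  cases hts : tsOf events with
  | nil => simp [targetOf, hts]
  | cons u0 rest =>
    have hpw' : (u0 :: rest).Pairwise (· < ·) := hts ▸ hpw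
    have hge : ∀ y ∈ u0 :: rest, u0 - 1 < y := by
      intro y hy
      rcases List.mem_cons.mp hy with rfl | hy
      · omega
      · have := (List.pairwise_cons.mp hpw').1 y hy; omega
    have heps : ∀ x ∈ epsOf events, x ≤ u0 - 1 ∨ x ∈ u0 :: rest := by
      intro x hx
      exact Or.inr (hts ▸ hmem x hx)
    have ha : (0 : Int) = cntOf events (u0 - 1) := by
      rw [cnt_zero events (u0 - 1)]
      intro x hx
      have := hge x (hts ▸ hmem x hx)
      omega
    rw [sweep_go events _ hD (u0 :: rest) (u0 - 1) 0 [] hpw' hge heps ha]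
    simp [targetOf, hts]

-- ---- sorted2 facts (PySem provides only sorted2_perm) ----

theorem sorted2_eq_foldl {α κ₂ : Type} [LT κ₂] [DecidableLT κ₂] (xs : List α) (k1 : α → Int) (k2 : α → κ₂) :
    PySem.List.sorted2 xs k1 k2
      = xs.foldl (fun acc x => PySem.List.insertBy
          (fun a b => decide (k1 a < k1 b) || (!decide (k1 b < k1 a) && decide (k2 a < k2 b))) x acc) [] := rfl

theorem insertBy2_pairwise {α κ₂ : Type} [LT κ₂] [DecidableLT κ₂] (k1 : α → Int) (k2 : α → κ₂)
    (x : α) (ys : List α) (h : ys.Pairwise (fun a b => k1 a ≤ k1 b)) :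
    (PySem.List.insertBy
      (fun a b => decide (k1 a < k1 b) || (!decide (k1 b < k1 a) && decide (k2 a < k2 b))) x ys).Pairwise
      (fun a b => k1 a ≤ k1 b) := by
  induction ys with
  | nil => simp [PySem.List.insertBy]
  | cons y ys ih =>
    rw [PySem.List.insertBy]
    by_cases hb : (decide (k1 x < k1 y) || (!decide (k1 y < k1 x) && decide (k2 x < k2 y))) = true
    · rw [if_pos hb]
      have hxy : k1 x ≤ k1 y := by
        rcases Bool.or_eq_true_iff.mp hb with h1 | h1
        · exact le_of_lt (of_decide_eq_true h1)
        · have := (Bool.and_eq_true _ _).mp h1 |>.1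
          simpa using le_of_not_gt (by simpa using this)
      refine List.pairwise_cons.mpr ⟨?_, h⟩
      intro z hz
      rcases List.mem_cons.mp hz with rfl | hz
      · exact hxy
      · exact le_trans hxy ((List.pairwise_cons.mp h).1 z hz)
    · rw [if_neg hb]
      have hyx : k1 y ≤ k1 x := by
        have h1 : ¬ (k1 x < k1 y) := by
          intro hc
          exact hb (Bool.or_eq_true_iff.mpr (Or.inl (decide_eq_true hc)))
        omega
      refine List.pairwise_cons.mpr ⟨?_, ih (List.pairwise_cons.mp h).2⟩
      intro z hz
      rcases (PySem.List.insertBy_mem_iff _ _ _ _).mp hz with rfl | hz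
      · exact hyx
      · exact (List.pairwise_cons.mp h).1 z hz

theorem sorted2_pairwise_fst {α κ₂ : Type} [LT κ₂] [DecidableLT κ₂] (xs : List α) (k1 : α → Int) (k2 : α → κ₂) :
    (PySem.List.sorted2 xs k1 k2).Pairwise (fun a b => k1 a ≤ k1 b) := by
  rw [sorted2_eq_foldl]
  have h : ∀ (acc : List α), acc.Pairwise (fun a b => k1 a ≤ k1 b) →
      (xs.foldl (fun acc x => PySem.List.insertBy
        (fun a b => decide (k1 a < k1 b) || (!decide (k1 b < k1 a) && decide (k2 a < k2 b))) x acc) acc).Pairwise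
        (fun a b => k1 a ≤ k1 b) := by
    induction xs with
    | nil => exact fun acc h => h
    | cons x xs ih =>
      intro acc hacc
      exact ih _ (insertBy2_pairwise k1 k2 x acc hacc)
  exact h [] (by simp)

theorem sorted2_eq_of_pairwise (ys zs : List (Int × Int)) (hperm : zs.Perm ys)
    (hlt : zs.Pairwise (fun a b => a.1 < b.1)) :
    PySem.List.sorted2 ys (fun t => t.1) (fun t => t.2) = zs :=
  PySem.List.eq_of_perm_of_pairwise_le_of_pairwise_lt (fun t => t.1)
    ((PySem.List.sorted2_perm ys _ _ false).trans hperm.symm)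
    (sorted2_pairwise_fst ys _ _) hlt

-- ---- the enumerate wrapper: the index is unused ----

theorem foldl_enumerate {α σ : Type} (f : σ → α → σ) :
    ∀ (xs : List α) (s : Int) (a : σ),
    (PySem.List.enumerate xs s).foldl (fun st it => f st it.2) a = xs.foldl f a
  | [], s, a => by simp [PySem.List.enumerate_nil]
  | x :: xs, s, a => by
    rw [PySem.List.enumerate_cons, List.foldl_cons, List.foldl_cons, foldl_enumerate f xs (s+1)]

-- ---- the scan loop produces the adjacent pairs of the deduped sorted times ----

theorem sdedup_gt : ∀ (m : List Int) (c : Int),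
    (sdedup c m).Pairwise (· < ·) ∧ ∀ x ∈ sdedup c m, c < x
  | [], c => by simp [sdedup]
  | x :: xs, c => by
    rw [sdedup]
    by_cases h : c < x
    · rw [if_pos h]
      obtain ⟨hpw, hgt⟩ := sdedup_gt xs x
      refine ⟨List.pairwise_cons.mpr ⟨hgt, hpw⟩, ?_⟩
      intro z hz
      rcases List.mem_cons.mp hz with rfl | hz
      · exact h
      · exact lt_trans h (hgt z hz)
    · rw [if_neg h]
      exact sdedup_gt xs c

theorem mem_sdedup : ∀ (m : List Int) (c : Int), (c :: m).Pairwise (· ≤ ·) →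
    ∀ x, (x ∈ sdedup c m ↔ x ∈ m ∧ c < x)
  | [], c, _, x => by simp [sdedup]
  | y :: ys, c, h, x => by
    have hcy : c ≤ y := (List.pairwise_cons.mp h).1 y (by simp)
    have hty : (y :: ys).Pairwise (· ≤ ·) := (List.pairwise_cons.mp h).2
    rw [sdedup]
    by_cases hlt : c < y
    · rw [if_pos hlt]
      constructor
      · intro hx
        rcases List.mem_cons.mp hx with rfl | hx
        · exact ⟨by simp, hlt⟩
        · have := (mem_sdedup ys y hty x).mp hx
          exact ⟨by simp [this.1], lt_trans hlt this.2⟩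
      · rintro ⟨hx, hcx⟩
        rcases List.mem_cons.mp hx with rfl | hx
        · simp
        · have hyx : y ≤ x := (List.pairwise_cons.mp hty).1 x hx
          by_cases hyx' : y < x
          · exact List.mem_cons.mpr (Or.inr ((mem_sdedup ys y hty x).mpr ⟨hx, hyx'⟩))
          · have : x = y := le_antisymm (le_of_not_gt (by simpa using hyx')) hyx
            simp [this]
    · rw [if_neg hlt]
      have hyc : y = c := le_antisymm (le_of_not_gt (by simpa using hlt)) hcy
      subst hyc
      have hcm : (y :: ys).Pairwise (· ≤ ·) := hty
      rw [mem_sdedup ys y hcm x]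
      constructor
      · rintro ⟨hx, hcx⟩; exact ⟨by simp [hx], hcx⟩
      · rintro ⟨hx, hcx⟩
        rcases List.mem_cons.mp hx with rfl | hx
        · omega
        · exact ⟨hx, hcx⟩

theorem aScan_ui : ∀ (m : List (Int × String)) (c : Int) (ui : List (Int × Int)) (ae : Int),
    (c :: m.map (fun t => t.1)).Pairwise (· ≤ ·) →
    (m.foldl aScanStep (ui, some c, ae)).1
      = ui ++ List.zip (c :: sdedup c (m.map (fun t => t.1))) (sdedup c (m.map (fun t => t.1)))
  | [], c, ui, ae, _ => by simp [sdedup]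
  | (t, ty) :: m', c, ui, ae, h => by
    have hct : c ≤ t := (List.pairwise_cons.mp h).1 t (by simp)
    have htail : (t :: m'.map (fun t => t.1)).Pairwise (· ≤ ·) := (List.pairwise_cons.mp h).2
    rw [List.foldl_cons]
    by_cases hlt : c < t
    · have hstep : aScanStep (ui, some c, ae) (t, ty)
          = (ui ++ [(c, t)], some t, if ty = "start" then ae + 1 else if ty = "end" then ae - 1 else ae) := by
        simp [aScanStep, hlt]
      rw [hstep, aScan_ui m' t (ui ++ [(c, t)]) _ htail]
      simp only [List.map_cons, sdedup, if_pos hlt, List.zip_cons_cons, List.append_assoc]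
      rfl
    · have hct' : t = c := le_antisymm (le_of_not_gt (by simpa using hlt)) hct
      subst hct'
      have hstep : aScanStep (ui, some t, ae) (t, ty)
          = (ui, some t, if ty = "start" then ae + 1 else if ty = "end" then ae - 1 else ae) := by
        simp [aScanStep]
      have hc : (t :: m'.map (fun t => t.1)).Pairwise (· ≤ ·) := htail
      rw [hstep, aScan_ui m' t ui _ hc]
      simp only [List.map_cons, sdedup, if_neg (lt_irrefl t)]

-- ---- adjacency facts about zip l l.tail on a strictly increasing l ----

theorem zip_mem_adj : ∀ (l : List Int), l.Pairwise (· < ·) →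
    ∀ u v, (u, v) ∈ List.zip l l.tail → u < v ∧ ∀ x ∈ l, x ≤ u ∨ v ≤ x
  | [], _, u, v, h => by simp at h
  | [a], _, u, v, h => by simp at h
  | a :: b :: l'', hpw, u, v, h => by
    simp only [List.tail_cons, List.zip_cons_cons] at h
    have hab : a < b := (List.pairwise_cons.mp hpw).1 b (by simp)
    rcases List.mem_cons.mp h with heq | hmem2
    · rw [Prod.mk.injEq] at heq
      obtain ⟨rfl, rfl⟩ := heq
      refine ⟨hab, ?_⟩
      intro x hx
      rcases List.mem_cons.mp hx with rfl | hx
      · exact Or.inl le_rfl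
      · rcases List.mem_cons.mp hx with rfl | hx
        · exact Or.inr le_rfl
        · exact Or.inr (le_of_lt ((List.pairwise_cons.mp (List.pairwise_cons.mp hpw).2).1 x hx))
    · have hrec := zip_mem_adj (b :: l'') (List.pairwise_cons.mp hpw).2 u v
        (by simp only [List.tail_cons]; exact hmem2)
      refine ⟨hrec.1, ?_⟩
      intro x hx
      rcases List.mem_cons.mp hx with rfl | hx
      · have hu : u ∈ b :: l'' := (List.of_mem_zip (l₂ := l'') hmem2).1
        exact Or.inl (le_of_lt ((List.pairwise_cons.mp hpw).1 u hu))
      · exact hrec.2 x hx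

theorem zip_pairwise_fst : ∀ (l : List Int), l.Pairwise (· < ·) →
    (List.zip l l.tail).Pairwise (fun a b => a.1 < b.1)
  | [], _ => by simp
  | [a], _ => by simp
  | a :: b :: l'', hpw => by
    simp only [List.tail_cons, List.zip_cons_cons]
    refine List.pairwise_cons.mpr ⟨?_, zip_pairwise_fst (b :: l'') (List.pairwise_cons.mp hpw).2⟩
    intro z hz
    have hz1 : z.1 ∈ b :: l'' := by
      have := List.of_mem_zip (l₁ := b :: l'') (l₂ := l'') (by exact hz)
      exact this.1
    exact (List.pairwise_cons.mp hpw).1 z.1 hz1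

-- ---- the split_events double loop ----

theorem set_add_idem {α : Type} [BEq α] [LawfulBEq α] (s : PySem.Set α) (x : α) :
    PySem.Set.add (PySem.Set.add s x) x = PySem.Set.add s x := by
  by_cases h : x ∈ s
  · simp [PySem.Set.add, PySem.Set.contains, h]
  · simp [PySem.Set.add, PySem.Set.contains, h]

theorem set_add_fresh {α : Type} [BEq α] [LawfulBEq α] (s : PySem.Set α) (x : α) (h : x ∉ s) :
    PySem.Set.add s x = s ++ [x] := by
  simp [PySem.Set.add, PySem.Set.contains, h]

theorem clip_fold (events : List (Int × Int)) (u v : Int)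
    (hadj : ∀ p ∈ events, p.1 < v → p.2 > u → p.1 ≤ u ∧ v ≤ p.2) :
    ∀ s : PySem.Set (Int × Int), events.foldl (aClipStep u v) s
      = if events.any (fun p => decide (p.1 < v) && decide (p.2 > u)) then PySem.Set.add s (u, v) else s := by
  induction events with
  | nil => intro s; simp
  | cons p es ih =>
    intro s
    rw [List.foldl_cons]
    by_cases hc : p.1 < v ∧ p.2 > u
    · have hclip : aClipStep u v s p = PySem.Set.add s (u, v) := by
        obtain ⟨h1, h2⟩ := hadj p (by simp) hc.1 hc.2
        simp only [aClipStep, if_pos hc]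
        rw [max_eq_right h1, min_eq_right h2]
      rw [hclip, ih (fun q hq => hadj q (by simp [hq]))]
      have hany : (p :: es).any (fun p => decide (p.1 < v) && decide (p.2 > u)) = true := by
        simp only [List.any_cons, Bool.or_eq_true]
        exact Or.inl (by simp [hc.1, hc.2])
      rw [if_pos hany]
      split_ifs with h2
      · exact set_add_idem s (u, v)
      · rfl
    · have hclip : aClipStep u v s p = s := by unfold aClipStep; rw [if_neg hc]
      rw [hclip, ih (fun q hq => hadj q (by simp [hq]))]
      have hof : (decide (p.1 < v) && decide (p.2 > u)) ≠ true := by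
        intro ht
        exact hc (by simpa using ht)
      rw [List.any_cons, Bool.eq_false_iff.mpr hof, Bool.false_or]

theorem split_fold (events : List (Int × Int)) :
    ∀ (E : List (Int × Int)) (s : PySem.Set (Int × Int)),
    (∀ uv ∈ E, ∀ p ∈ events, p.1 < uv.2 → p.2 > uv.1 → p.1 ≤ uv.1 ∧ uv.2 ≤ p.2) →
    E.Nodup → (∀ e ∈ E, e ∉ s) →
    E.foldl (fun s iv => events.foldl (aClipStep iv.1 iv.2) s) s
      = s ++ E.filter (fun uv => events.any (fun p => decide (p.1 < uv.2) && decide (p.2 > uv.1)))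
  | [], s, _, _, _ => by simp
  | e :: E', s, hadj, hnd, hfr => by
    rw [List.foldl_cons, List.filter_cons,
        clip_fold events e.1 e.2 (fun p hp => hadj e (by simp) p hp) s]
    by_cases hany : events.any (fun p => decide (p.1 < e.2) && decide (p.2 > e.1)) = true
    · rw [if_pos hany, if_pos (by simpa using hany)]
      rw [set_add_fresh s e (hfr e (by simp))]
      rw [split_fold events E' (s ++ [e]) (fun uv huv => hadj uv (by simp [huv]))
          (List.nodup_cons.mp hnd).2 ?_]
      · simp [List.append_assoc]
      · intro x hx
        simp only [List.mem_append, List.mem_singleton]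
        rintro (hxs | rfl)
        · exact hfr x (by simp [hx]) hxs
        · exact (List.nodup_cons.mp hnd).1 hx
    · rw [if_neg hany, if_neg (by simpa using hany)]
      exact split_fold events E' s (fun uv huv => hadj uv (by simp [huv]))
        (List.nodup_cons.mp hnd).2 (fun x hx => hfr x (by simp [hx]))

-- ---- the two filter predicates agree on elementary intervals ----

theorem cnt_pos_iff (events : List (Int × Int)) (t : Int) :
    0 < cntOf events t ↔ ∃ p ∈ events, p.1 ≤ t ∧ t < p.2 := by
  unfold cntOf
  have h : (events.map (fun p => if p.1 ≤ t ∧ t < p.2 then (1:Int) else 0))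
      = events.map (fun p => if (decide (p.1 ≤ t) && decide (t < p.2)) = true then (1:Int) else 0) := by
    apply List.map_congr_left
    intro p _
    by_cases hc : p.1 ≤ t ∧ t < p.2
    · rw [if_pos hc, if_pos (by simp [hc.1, hc.2])]
    · rw [if_neg hc, if_neg (by simpa using hc)]
  rw [h, PySem.List.sum_map_ite_one_zero]
  rw [Int.natCast_pos, List.countP_pos_iff]
  simp

-- ---- assembling A ----

theorem map_fst_timepoints (events : List (Int × Int)) :
    (events.flatMap (fun p => [(p.1, "start"), (p.2, "end")])).map (fun t => t.1) = epsOf events := by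
  simp [epsOf, List.map_flatMap]

theorem a_eq_target (events : List (Int × Int)) :
    non_overlapping_periods events = targetOf events := by
  unfold non_overlapping_periods
  simp only []
  rw [PySem.List.foldl_append_eq_flatMap (fun p => [(p.1, "start"), (p.2, "end")]) events []]
  rw [List.nil_append]
  have hperm : (PySem.List.sorted2 (events.flatMap (fun p => [(p.1, "start"), (p.2, "end")]))
      (fun t => t.1) (fun t => t.2)).Perm (events.flatMap (fun p => [(p.1, "start"), (p.2, "end")])) :=
    PySem.List.sorted2_perm _ _ _ false
  have hpwts : (tsOf events).Pairwise (· < ·) := PySem.List.sorted_ofList_pairwise_lt (epsOf events)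
  cases htps : PySem.List.sorted2 (events.flatMap (fun p => [(p.1, "start"), (p.2, "end")]))
      (fun t => t.1) (fun t => t.2) with
  | nil =>
    have heps : epsOf events = [] := by
      rw [← map_fst_timepoints events]
      have hflat : events.flatMap (fun p => [(p.1, "start"), (p.2, "end")]) = [] :=
        (htps ▸ hperm).symm.eq_nil
      rw [hflat]
      rfl
    have hts : tsOf events = [] := by rw [tsOf, heps]; rfl
    simp [PySem.List.enumerate_nil, targetOf, hts]
    rfl
  | cons t0 rest =>
    have hperm' := htps ▸ hperm
    -- the sorted first components
    have hpwfst : ((t0 :: rest).map (fun t => t.1)).Pairwise (· ≤ ·) := by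
      have := sorted2_pairwise_fst (events.flatMap (fun p => [(p.1, "start"), (p.2, "end")]))
        (fun t => t.1) (fun t : Int × String => t.2)
      rw [htps] at this
      exact List.pairwise_map.mpr this
    have hpwfst' : (t0.1 :: rest.map (fun t => t.1)).Pairwise (· ≤ ·) := by
      simpa using hpwfst
    -- the deduped time list equals tsOf events
    have hdedup : tsOf events = t0.1 :: sdedup t0.1 (rest.map (fun t => t.1)) := by
      have hmemiff : ∀ x, x ∈ t0.1 :: sdedup t0.1 (rest.map (fun t => t.1)) ↔ x ∈ epsOf events := by
        intro x
        rw [← map_fst_timepoints events]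
        have hpm : ((t0 :: rest).map (fun t => t.1)).Perm
            ((events.flatMap (fun p => [(p.1, "start"), (p.2, "end")])).map (fun t => t.1)) :=
          hperm'.map _
        rw [← hpm.mem_iff]
        simp only [List.map_cons, List.mem_cons]
        rw [mem_sdedup (rest.map (fun t => t.1)) t0.1 hpwfst' x]
        constructor
        · rintro (rfl | ⟨hx, _⟩)
          · exact Or.inl rfl
          · exact Or.inr hx
        · rintro (rfl | hx)
          · exact Or.inl rfl
          · by_cases hgt : t0.1 < x
            · exact Or.inr ⟨hx, hgt⟩
            · have hle : t0.1 ≤ x := (List.pairwise_cons.mp hpwfst').1 x hx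
              have : x = t0.1 := le_antisymm (le_of_not_gt (by simpa using hgt)) hle
              exact Or.inl this
      have hpwd : (t0.1 :: sdedup t0.1 (rest.map (fun t => t.1))).Pairwise (· < ·) :=
        List.pairwise_cons.mpr ⟨(sdedup_gt (rest.map (fun t => t.1)) t0.1).2,
          (sdedup_gt (rest.map (fun t => t.1)) t0.1).1⟩
      have hnd : (t0.1 :: sdedup t0.1 (rest.map (fun t => t.1))).Nodup :=
        hpwd.imp (fun h => ne_of_lt h)
      have hpm2 : (t0.1 :: sdedup t0.1 (rest.map (fun t => t.1))).Perm
          (PySem.Set.ofList (epsOf events)) := by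
        rw [List.perm_ext_iff_of_nodup hnd (PySem.Set.nodup_ofList (epsOf events))]
        intro a
        rw [PySem.Set.mem_ofList]
        exact hmemiff a
      exact PySem.List.eq_of_perm_of_pairwise_le_of_pairwise_lt (fun x => x)
        ((PySem.List.sorted_perm _ _ _).trans hpm2.symm)
        (hpwts.imp le_of_lt) hpwd
    -- the scan loop
    rw [foldl_enumerate (fun st it => aScanStep st it) (t0 :: rest) 0]
    rw [List.foldl_cons]
    have hstep0 : aScanStep ([], none, 0) t0 = ([], some t0.1,
        if t0.2 = "start" then (0:Int) + 1 else if t0.2 = "end" then (0:Int) - 1 else 0) := by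
      simp [aScanStep]
    rw [hstep0, aScan_ui rest t0.1 [] _ hpwfst']
    rw [List.nil_append]
    have hzip : List.zip (t0.1 :: sdedup t0.1 (rest.map (fun t => t.1)))
          (sdedup t0.1 (rest.map (fun t => t.1)))
        = List.zip (tsOf events) (tsOf events).tail := by
      rw [hdedup, List.tail_cons]
    rw [hzip]
    -- the split_events double loop
    have hadj : ∀ uv ∈ List.zip (tsOf events) (tsOf events).tail, ∀ p ∈ events,
        p.1 < uv.2 → p.2 > uv.1 → p.1 ≤ uv.1 ∧ uv.2 ≤ p.2 := by
      intro uv huv p hp h1 h2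
      obtain ⟨u, v⟩ := uv
      have hadj' := zip_mem_adj (tsOf events) hpwts u v huv
      have hm1 : p.1 ∈ tsOf events := by
        rw [tsOf, PySem.List.mem_sorted, PySem.Set.mem_ofList]
        exact mem_epsOf_left hp
      have hm2 : p.2 ∈ tsOf events := by
        rw [tsOf, PySem.List.mem_sorted, PySem.Set.mem_ofList]
        exact mem_epsOf_right hp
      constructor
      · rcases hadj'.2 p.1 hm1 with h | h
        · exact h
        · omega
      · rcases hadj'.2 p.2 hm2 with h | h
        · omega
        · exact h
    have hndE : (List.zip (tsOf events) (tsOf events).tail).Nodup :=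
      (zip_pairwise_fst (tsOf events) hpwts).imp (fun h => by
        intro heq; rw [heq] at h; exact lt_irrefl _ h)
    rw [split_fold events (List.zip (tsOf events) (tsOf events).tail) PySem.Set.empty hadj hndE
      (fun e _ hmem => by simp [PySem.Set.empty] at hmem)]
    rw [show (PySem.Set.empty : PySem.Set (Int × Int)) = ([] : List (Int × Int)) from rfl,
        List.nil_append]
    -- the two filters agree
    have hfilter : (List.zip (tsOf events) (tsOf events).tail).filter
          (fun uv => events.any (fun p => decide (p.1 < uv.2) && decide (p.2 > uv.1)))
        = targetOf events := by
      unfold targetOf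
      apply List.filter_congr
      intro uv huv
      obtain ⟨u, v⟩ := uv
      have hadj' := zip_mem_adj (tsOf events) hpwts u v huv
      have hiff : (∃ p ∈ events, p.1 < v ∧ p.2 > u) ↔ (0 < cntOf events u) := by
        rw [cnt_pos_iff]
        constructor
        · rintro ⟨p, hp, h1, h2⟩
          have hm1 : p.1 ∈ tsOf events := by
            rw [tsOf, PySem.List.mem_sorted, PySem.Set.mem_ofList]
            exact mem_epsOf_left hp
          refine ⟨p, hp, ?_, h2⟩
          rcases hadj'.2 p.1 hm1 with h | h
          · exact h
          · omega
        · rintro ⟨p, hp, h1, h2⟩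
          exact ⟨p, hp, by omega, h2⟩
      have hany : (events.any fun p => decide (p.1 < v) && decide (p.2 > u)) = true
          ↔ 0 < cntOf events u := by
        rw [← hiff]
        simp only [List.any_eq_true, Bool.and_eq_true, decide_eq_true_eq]
      by_cases hc : 0 < cntOf events u
      · rw [hany.mpr hc, decide_eq_true hc]
      · rw [decide_eq_false hc]
        exact Bool.eq_false_iff.mpr (fun ht => hc (hany.mp ht))
    rw [hfilter]
    -- the final sort is the identity on the already sorted filtered list
    apply sorted2_eq_of_pairwise
    · exact List.Perm.refl _
    · unfold targetOf
      exact (zip_pairwise_fst (tsOf events) hpwts).filter _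

-- ===== VERDICT (by name: the statement is the Claim_ definition above) =====
theorem non_overlapping_periods_spec : Claim_equal_non_overlapping_periods := by
  intro events _
  show _ = _
  rw [a_eq_target, b_eq_target]
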